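-- pv_equiv track=rewrite | github.com/Toralis-Labs/Aortic-Dynamics-Model | src/step4/evar_geometry_measurements.py | _resolve_segment_names
-- ===== SOURCE A (Python) =====
-- from typing import Any, Iterable, Optional
--
-- CANONICAL_ALIASES = {
--     "abdominal_aorta": ("abdominal_aorta", "abdominal_aorta_trunk", "aorta", "aorta_trunk"),
--     "left_renal_artery": ("left_renal_artery", "left_renal", "left_kidney_artery"),
--     "right_renal_artery": ("right_renal_artery", "right_renal", "right_kidney_artery"),
--     "left_common_iliac": ("left_common_iliac", "left_common_iliac_artery", "left_cia"),
--     "right_common_iliac": ("right_common_iliac", "right_common_iliac_artery", "right_cia"),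
--     "left_external_iliac": ("left_external_iliac", "left_external_iliac_artery", "left_eia"),
--     "right_external_iliac": ("right_external_iliac", "right_external_iliac_artery", "right_eia"),
--     "left_internal_iliac": (
--         "left_internal_iliac",
--         "left_internal_iliac_artery",
--         "left_iia",
--         "left_hypogastric",
--     ),
--     "right_internal_iliac": (
--         "right_internal_iliac",
--         "right_internal_iliac_artery",
--         "right_iia",
--         "right_hypogastric",
--     ),
--     "left_femoral": ("left_common_femoral", "left_femoral", "left_femoral_artery"),
--     "right_femoral": ("right_common_femoral", "right_femoral", "right_femoral_artery"),
-- }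
--
-- def _normalize_name(value: str) -> str:
--     chars: list[str] = []
--     last_was_sep = False
--     for char in str(value).strip().lower():
--         if char.isalnum():
--             chars.append(char)
--             last_was_sep = False
--         elif not last_was_sep:
--             chars.append("_")
--             last_was_sep = True
--     return "".join(chars).strip("_")
--
-- def _resolve_segment_names(available_names: Iterable[str]) -> dict[str, Optional[str]]:
--     normalized: dict[str, str] = {}
--     for name in available_names:
--         normalized.setdefault(_normalize_name(name), str(name))
--
--     resolved: dict[str, Optional[str]] = {}
--     for canonical, aliases in CANONICAL_ALIASES.items():
--         found = None
--         for alias in aliases: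
--             found = normalized.get(_normalize_name(alias))
--             if found:
--                 break
--         resolved[canonical] = found
--     return resolved
-- ===== SOURCE B (Python) =====
-- CANONICAL_ALIASES = {
--     "abdominal_aorta": ("abdominal_aorta", "abdominal_aorta_trunk", "aorta", "aorta_trunk"),
--     "left_renal_artery": ("left_renal_artery", "left_renal", "left_kidney_artery"),
--     "right_renal_artery": ("right_renal_artery", "right_renal", "right_kidney_artery"),
--     "left_common_iliac": ("left_common_iliac", "left_common_iliac_artery", "left_cia"),
--     "right_common_iliac": ("right_common_iliac", "right_common_iliac_artery", "right_cia"),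
--     "left_external_iliac": ("left_external_iliac", "left_external_iliac_artery", "left_eia"),
--     "right_external_iliac": ("right_external_iliac", "right_external_iliac_artery", "right_eia"),
--     "left_internal_iliac": (
--         "left_internal_iliac",
--         "left_internal_iliac_artery",
--         "left_iia",
--         "left_hypogastric",
--     ),
--     "right_internal_iliac": (
--         "right_internal_iliac",
--         "right_internal_iliac_artery",
--         "right_iia",
--         "right_hypogastric",
--     ),
--     "left_femoral": ("left_common_femoral", "left_femoral", "left_femoral_artery"),
--     "right_femoral": ("right_common_femoral", "right_femoral", "right_femoral_artery"),
-- }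
--
-- def _normalize_name(value: str) -> str:
--     chars: list[str] = []
--     last_was_sep = False
--     for char in str(value).strip().lower():
--         if char.isalnum():
--             chars.append(char)
--             last_was_sep = False
--         elif not last_was_sep:
--             chars.append("_")
--             last_was_sep = True
--     return "".join(chars).strip("_")
--
--
-- # B: transposed join — build an inverted index alias-normalization -> (canonical, priority)
-- # from the constant table once, then make a SINGLE pass over available_names keeping, per
-- # canonical, the best-priority (lowest alias rank, first occurrence on ties) name seen.
-- def _resolve_segment_names(available_names):
--     index = {}
--     for canonical, aliases in CANONICAL_ALIASES.items():
--         for rank, alias in enumerate(aliases):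
--             index[_normalize_name(alias)] = (canonical, rank)
--
--     best = {}  # canonical -> (rank, name)
--     for name in available_names:
--         hit = index.get(_normalize_name(name))
--         if hit is not None:
--             canonical, rank = hit
--             cur = best.get(canonical)
--             if cur is None or rank < cur[0]:
--                 best[canonical] = (rank, str(name))
--
--     return {canonical: (best[canonical][1] if canonical in best else None)
--             for canonical in CANONICAL_ALIASES}
-- ===== Notes on version B (the rewrite author's own statement) =====
-- stated objective: alternative
-- what changed: Transposes the join: instead of A's per-canonical loop over aliases with lookups into a normalized-name dictionary built from the data, B builds an inverted index alias-normalization->(canonical,rank) from the constant table once and makes a single pass over available_names, keeping per canonical the lowest-rank (first occurrence on ties) match.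
import Mathlib
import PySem

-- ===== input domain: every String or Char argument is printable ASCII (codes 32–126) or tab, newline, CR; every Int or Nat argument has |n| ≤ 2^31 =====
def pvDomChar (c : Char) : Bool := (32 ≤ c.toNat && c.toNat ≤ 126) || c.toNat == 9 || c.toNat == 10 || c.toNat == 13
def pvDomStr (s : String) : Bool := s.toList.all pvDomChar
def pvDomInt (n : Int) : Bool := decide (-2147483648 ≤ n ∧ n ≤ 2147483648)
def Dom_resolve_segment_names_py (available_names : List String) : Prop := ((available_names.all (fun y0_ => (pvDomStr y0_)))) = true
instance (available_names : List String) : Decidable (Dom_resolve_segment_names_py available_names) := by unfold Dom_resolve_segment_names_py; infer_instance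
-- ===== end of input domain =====

-- B transposes the join: an inverted index alias→(canonical, rank) built once from the
-- constant table, then a single pass over available_names keeping the best-rank match per
-- canonical (first occurrence wins ties); alternative decomposition, not claimed faster.

-- shared module helper _normalize_name (used by both A and B in Python)
def pyNormalize (s : String) : String :=
  let base := PySem.Chars.lower (PySem.Chars.strip s.toList)
  let r := base.foldl
    (fun (acc : List Char × Bool) c =>
      if PySem.Chars.isalnum c then (acc.1 ++ [c], false)
      else if acc.2 = false then (acc.1 ++ ['_'], true)
      else acc) ([], false)
  String.ofList (PySem.Chars.stripChars r.1 ['_'])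

-- module constant CANONICAL_ALIASES (dict of tuples → association list)
def CANONICAL_ALIASES : List (String × List String) :=
  [ ("abdominal_aorta", ["abdominal_aorta", "abdominal_aorta_trunk", "aorta", "aorta_trunk"]),
    ("left_renal_artery", ["left_renal_artery", "left_renal", "left_kidney_artery"]),
    ("right_renal_artery", ["right_renal_artery", "right_renal", "right_kidney_artery"]),
    ("left_common_iliac", ["left_common_iliac", "left_common_iliac_artery", "left_cia"]),
    ("right_common_iliac", ["right_common_iliac", "right_common_iliac_artery", "right_cia"]),
    ("left_external_iliac", ["left_external_iliac", "left_external_iliac_artery", "left_eia"]),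
    ("right_external_iliac", ["right_external_iliac", "right_external_iliac_artery", "right_eia"]),
    ("left_internal_iliac", ["left_internal_iliac", "left_internal_iliac_artery", "left_iia", "left_hypogastric"]),
    ("right_internal_iliac", ["right_internal_iliac", "right_internal_iliac_artery", "right_iia", "right_hypogastric"]),
    ("left_femoral", ["left_common_femoral", "left_femoral", "left_femoral_artery"]),
    ("right_femoral", ["right_common_femoral", "right_femoral", "right_femoral_artery"]) ]

-- Python truthiness of an Optional[str]: None and "" are falsy
def pyTruthy (o : Option String) : Bool :=
  match o with
  | none => false
  | some s => !s.toList.isEmpty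

-- ===== PORT A =====
def resolve_segment_names_py (available_names : List String) : List (String × Option String) :=
  let normalized : PySem.Dict String String :=
    available_names.foldl (fun d nm => d.setdefault (pyNormalize nm) nm) PySem.Dict.empty
  (CANONICAL_ALIASES.foldl
    (fun (res : PySem.Dict String (Option String)) ca =>
      let st := ca.2.foldl
        (fun (st : Option String × Bool) al =>
          if st.2 then st
          else
            let f := normalized.get? (pyNormalize al)
            (f, pyTruthy f)) (none, false)
      res.insert ca.1 st.1) PySem.Dict.empty).items

-- ===== PORT B =====
-- inverted index: normalized alias → (canonical, rank within that canonical's alias tuple)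
def buildIndexB : PySem.Dict String (String × Int) :=
  CANONICAL_ALIASES.foldl
    (fun d ca =>
      (PySem.List.enumerate ca.2).foldl
        (fun d p => d.insert (pyNormalize p.2) (ca.1, p.1)) d)
    PySem.Dict.empty

-- one step of B's single pass: keep per canonical the strictly-better-rank name
def stepB (b : PySem.Dict String (Int × String)) (nm : String) : PySem.Dict String (Int × String) :=
  match buildIndexB.get? (pyNormalize nm) with
  | none => b
  | some cr =>
    match b.get? cr.1 with
    | none => b.insert cr.1 (cr.2, nm)
    | some pr => if cr.2 < pr.1 then b.insert cr.1 (cr.2, nm) else b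

def resolve_segment_names_py_alt (available_names : List String) : List (String × Option String) :=
  let best := available_names.foldl stepB PySem.Dict.empty
  (CANONICAL_ALIASES.foldl
    (fun (res : PySem.Dict String (Option String)) ca =>
      res.insert ca.1 ((best.get? ca.1).map Prod.snd)) PySem.Dict.empty).items

-- ===== PRECONDITION & SPEC =====
def Spec_resolve_segment_names_py (available_names : List String) (out : List (String × Option String)) : Prop := out = resolve_segment_names_py_alt available_names
instance (available_names : List String) (out : List (String × Option String)) : Decidable (Spec_resolve_segment_names_py available_names out) := by unfold Spec_resolve_segment_names_py; infer_instance

-- ===== CLAIM (what is proved, stated in full; the proofs are below) =====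
def Claim_equal_resolve_segment_names_py : Prop := ∀ (available_names : List String), Dom_resolve_segment_names_py available_names → Spec_resolve_segment_names_py available_names (resolve_segment_names_py available_names)



-- ===== LEMMAS AND PROOFS =====

-- first name in the list whose normalization equals k (what A's setdefault dict stores at k)
def findName (names : List String) (k : String) : Option String :=
  names.find? (fun nm => pyNormalize nm == k)

-- A's per-canonical answer: first alias (already normalized) matched by some name
def aval (names : List String) : List String → Option String
  | [] => none
  | a :: rest => (findName names a).or (aval names rest)

-- A's setdefault-built index looked up at k is the first name normalizing to k
theorem build_get? (names : List String) (d : PySem.Dict String String) (k : String) :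
    (names.foldl (fun d nm => d.setdefault (pyNormalize nm) nm) d).get? k
      = (d.get? k).or (findName names k) := by
  induction names generalizing d with
  | nil => simp [findName]
  | cons nm rest ih =>
    simp only [List.foldl_cons]
    rw [ih]
    by_cases h : pyNormalize nm = k
    · subst h
      rw [PySem.Dict.get?_setdefault_self]
      have hR : findName (nm :: rest) (pyNormalize nm) = some nm := by
        simp [findName, List.find?]
      rw [hR]
      cases d.get? (pyNormalize nm) <;> simp
    · rw [PySem.Dict.get?_setdefault_of_ne d nm (Ne.symm h)]
      have hb : (pyNormalize nm == k) = false := beq_eq_false_iff_ne.mpr h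
      have hR : findName (nm :: rest) k = findName rest k := by
        simp [findName, List.find?, hb]
      rw [hR]

theorem getNormalized (names : List String) (k : String) :
    (names.foldl (fun d nm => d.setdefault (pyNormalize nm) nm) PySem.Dict.empty).get? k
      = findName names k := by
  rw [build_get?]; simp

-- a name matching a nonempty normalized key is itself nonempty, hence truthy
theorem truthy_findName (names : List String) (k : String) (s : String)
    (hk : k ≠ "") (h : findName names k = some s) : pyTruthy (some s) = true := by
  have hp := List.find?_some h
  have hnorm : pyNormalize s = k := by simpa using hp
  have hs : s ≠ "" := by
    intro he; subst he
    exact hk (hnorm.symm.trans (by decide))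
  have : s.toList ≠ [] := fun hl => hs (String.toList_eq_nil_iff.mp hl)
  simp [pyTruthy, this]

-- A's inner alias fold never changes state after the truthy break
theorem stayTrue (m : String → Option String) (als : List String) (x : Option String) :
    als.foldl (fun (st : Option String × Bool) al =>
      if st.2 then st else (m (pyNormalize al), pyTruthy (m (pyNormalize al)))) (x, true)
      = (x, true) := by
  induction als with
  | nil => rfl
  | cons a rest ih => simpa using ih

-- A's inner alias fold computes aval over the normalized aliases
theorem innerA (names : List String) (als : List String)
    (hne : ∀ a ∈ als, pyNormalize a ≠ "") :
    (als.foldl (fun (st : Option String × Bool) al =>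
        if st.2 then st
        else (findName names (pyNormalize al), pyTruthy (findName names (pyNormalize al))))
      (none, false)).1
      = aval names (als.map pyNormalize) := by
  induction als with
  | nil => rfl
  | cons a rest ih =>
    simp only [List.foldl_cons, List.map_cons, aval]
    have h0 : (if (false : Bool) then ((none : Option String), false)
        else (findName names (pyNormalize a), pyTruthy (findName names (pyNormalize a))))
        = (findName names (pyNormalize a), pyTruthy (findName names (pyNormalize a))) := by simp
    rw [h0]
    cases hf : findName names (pyNormalize a) with
    | none =>
      have hpt : pyTruthy none = false := rfl
      rw [hpt, ih (fun x hx => hne x (List.mem_cons_of_mem _ hx))]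
      simp
    | some s =>
      have ht : pyTruthy (some s) = true :=
        truthy_findName names _ s (hne a (List.mem_cons_self)) hf
      rw [ht, stayTrue (findName names) rest (some s)]
      simp

-- ----- B side -----

-- the flat (key, value) list whose left-to-right insertion builds buildIndexB
def IndexL : List (String × (String × Int)) :=
  CANONICAL_ALIASES.flatMap
    (fun ca => (PySem.List.enumerate ca.2).map (fun p => (pyNormalize p.2, (ca.1, p.1))))

theorem buildIndexB_eq_flat :
    buildIndexB = IndexL.foldl (fun d p => d.insert p.1 p.2) PySem.Dict.empty := by
  unfold buildIndexB IndexL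
  rw [List.foldl_flatMap]
  simp [List.foldl_map]

-- lookup in a fold of inserts over distinct keys is find? in the list
theorem get?_foldl_insert {V : Type} (l : List (String × V)) (d : PySem.Dict String V)
    (k : String) (h : (l.map Prod.fst).Nodup) :
    (l.foldl (fun d p => d.insert p.1 p.2) d).get? k
      = ((l.find? (fun p => p.1 == k)).map Prod.snd).or (d.get? k) := by
  induction l generalizing d with
  | nil => simp
  | cons p rest ih =>
    simp only [List.map_cons, List.nodup_cons] at h
    simp only [List.foldl_cons]
    rw [ih _ h.2]
    by_cases hk : p.1 = k
    · subst hk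
      have hnone : rest.find? (fun q => q.1 == p.1) = none := by
        apply List.find?_eq_none.mpr
        intro q hq hbeq
        have hqp : q.1 = p.1 := beq_iff_eq.mp hbeq
        exact h.1 (hqp ▸ List.mem_map_of_mem hq)
      have hfind : List.find? (fun q => q.1 == p.1) (p :: rest) = some p := by
        simp [List.find?]
      rw [hfind, hnone, PySem.Dict.get?_insert_self]
      simp
    · have hb : (p.1 == k) = false := beq_eq_false_iff_ne.mpr hk
      have hfind : List.find? (fun q => q.1 == k) (p :: rest)
          = List.find? (fun q => q.1 == k) rest := by
        simp [List.find?, hb]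
      rw [hfind, PySem.Dict.get?_insert_of_ne d p.2 (Ne.symm hk)]

set_option maxRecDepth 100000 in
set_option maxHeartbeats 1000000 in
theorem IndexL_lit : IndexL = [("abdominal_aorta", ("abdominal_aorta", 0)), ("abdominal_aorta_trunk", ("abdominal_aorta", 1)),
   ("aorta", ("abdominal_aorta", 2)), ("aorta_trunk", ("abdominal_aorta", 3)),
   ("left_renal_artery", ("left_renal_artery", 0)), ("left_renal", ("left_renal_artery", 1)),
   ("left_kidney_artery", ("left_renal_artery", 2)),
   ("right_renal_artery", ("right_renal_artery", 0)), ("right_renal", ("right_renal_artery", 1)),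
   ("right_kidney_artery", ("right_renal_artery", 2)),
   ("left_common_iliac", ("left_common_iliac", 0)), ("left_common_iliac_artery", ("left_common_iliac", 1)),
   ("left_cia", ("left_common_iliac", 2)),
   ("right_common_iliac", ("right_common_iliac", 0)), ("right_common_iliac_artery", ("right_common_iliac", 1)),
   ("right_cia", ("right_common_iliac", 2)),
   ("left_external_iliac", ("left_external_iliac", 0)), ("left_external_iliac_artery", ("left_external_iliac", 1)),
   ("left_eia", ("left_external_iliac", 2)),
   ("right_external_iliac", ("right_external_iliac", 0)), ("right_external_iliac_artery", ("right_external_iliac", 1)),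
   ("right_eia", ("right_external_iliac", 2)),
   ("left_internal_iliac", ("left_internal_iliac", 0)), ("left_internal_iliac_artery", ("left_internal_iliac", 1)),
   ("left_iia", ("left_internal_iliac", 2)), ("left_hypogastric", ("left_internal_iliac", 3)),
   ("right_internal_iliac", ("right_internal_iliac", 0)), ("right_internal_iliac_artery", ("right_internal_iliac", 1)),
   ("right_iia", ("right_internal_iliac", 2)), ("right_hypogastric", ("right_internal_iliac", 3)),
   ("left_common_femoral", ("left_femoral", 0)), ("left_femoral", ("left_femoral", 1)),
   ("left_femoral_artery", ("left_femoral", 2)),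
   ("right_common_femoral", ("right_femoral", 0)), ("right_femoral", ("right_femoral", 1)),
   ("right_femoral_artery", ("right_femoral", 2))] := by decide

theorem indexL_nodup : (IndexL.map Prod.fst).Nodup := by
  rw [IndexL_lit]; decide

theorem indexB_get? (k : String) :
    buildIndexB.get? k = (IndexL.find? (fun p => p.1 == k)).map Prod.snd := by
  rw [buildIndexB_eq_flat, get?_foldl_insert _ _ _ indexL_nodup]
  simp

-- one step of B's pass, observed at one canonical key c
theorem stepB_get? (b0 : PySem.Dict String (Int × String)) (nm c : String) :
    (stepB b0 nm).get? c
      = (match buildIndexB.get? (pyNormalize nm) with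
        | none => b0.get? c
        | some cr =>
          if cr.1 = c then
            match b0.get? c with
            | none => some (cr.2, nm)
            | some pr => if cr.2 < pr.1 then some (cr.2, nm) else b0.get? c
          else b0.get? c) := by
  unfold stepB
  cases hidx : buildIndexB.get? (pyNormalize nm) with
  | none => rfl
  | some cr =>
    by_cases hc : cr.1 = c
    · subst hc
      cases hb : b0.get? cr.1 with
      | none => simp [hb, PySem.Dict.get?_insert_self]
      | some pr =>
        by_cases hlt : cr.2 < pr.1
        · simp [hb, hlt, PySem.Dict.get?_insert_self]
        · simp [hb, hlt]
    · cases hb : b0.get? cr.1 with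
      | none => simp [hb, hc, PySem.Dict.get?_insert_of_ne _ _ (Ne.symm hc)]
      | some pr =>
        by_cases hlt : cr.2 < pr.1
        · simp [hb, hc, hlt, PySem.Dict.get?_insert_of_ne _ _ (Ne.symm hc)]
        · simp [hb, hc, hlt]

-- B's fold, observed at one canonical key c, is a fold of per-name updates of that entry
theorem bestGet (c : String) (names : List String) (b0 : PySem.Dict String (Int × String)) :
    (names.foldl stepB b0).get? c
      = names.foldl
          (fun (cur : Option (Int × String)) nm =>
            match buildIndexB.get? (pyNormalize nm) with
            | none => cur
            | some cr =>
              if cr.1 = c then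
                match cur with
                | none => some (cr.2, nm)
                | some pr => if cr.2 < pr.1 then some (cr.2, nm) else cur
              else cur)
          (b0.get? c) := by
  induction names generalizing b0 with
  | nil => rfl
  | cons nm rest ih =>
    simp only [List.foldl_cons]
    rw [ih, stepB_get?]

-- the same per-name update written against the canonical's own alias list
def gstep (als : List String) (cur : Option (Int × String)) (nm : String) :
    Option (Int × String) :=
  match List.idxOf? (pyNormalize nm) als with
  | none => cur
  | some i =>
    match cur with
    | none => some ((i : Int), nm)
    | some pr => if (i : Int) < pr.1 then some ((i : Int), nm) else cur

def rankNat (als : List String) (cur : Option (Int × String)) : Nat :=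
  match cur with
  | none => als.length
  | some pr => pr.1.toNat

theorem aval_nil_names (als : List String) : aval [] als = none := by
  induction als with
  | nil => rfl
  | cons a rest ih => simp [aval, findName, ih]

theorem aval_cons_notmem (nm : String) (names : List String) (als : List String)
    (h : pyNormalize nm ∉ als) : aval (nm :: names) als = aval names als := by
  induction als with
  | nil => rfl
  | cons a rest ih =>
    simp only [List.mem_cons, not_or] at h
    have hb : (pyNormalize nm == a) = false := beq_eq_false_iff_ne.mpr h.1
    simp [aval, findName, List.find?, hb, ih h.2]

theorem aval_append (names : List String) (l1 l2 : List String) :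
    aval names (l1 ++ l2) = (aval names l1).or (aval names l2) := by
  induction l1 with
  | nil => simp [aval]
  | cons a rest ih => simp [aval, ih, Option.or_assoc]

theorem index?_lt_length (als : List String) (v : String) (i : Nat)
    (hidx : PySem.List.index? als v = some i) : i < als.length := by
  obtain ⟨pre, suf, hs, hl, -⟩ := (PySem.List.index?_eq_some_iff als v i).mp hidx
  subst hs
  simp only [List.length_append, List.length_cons]
  omega

theorem notmem_take_of_index? (als : List String) (v : String) (i r : Nat)
    (hidx : PySem.List.index? als v = some i) (hri : r ≤ i) : v ∉ als.take r := by
  obtain ⟨pre, suf, hs, hl, hnot⟩ := (PySem.List.index?_eq_some_iff als v i).mp hidx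
  subst hs
  intro hmem
  apply hnot
  have htake : (pre ++ v :: suf).take r = pre.take r := by
    rw [List.take_append]
    have h0 : r - pre.length = 0 := by omega
    simp [h0]
  rw [htake] at hmem
  exact List.mem_of_mem_take hmem

-- decomposition of aval at the first matched alias index
theorem aval_take_hit (nm : String) (names : List String) (als : List String) (i R : Nat)
    (hidx : PySem.List.index? als (pyNormalize nm) = some i) (hiR : i < R) :
    aval (nm :: names) (als.take R)
      = (aval names (als.take i)).or (some nm) := by
  obtain ⟨pre, suf, hs, hl, hnot⟩ :=
    (PySem.List.index?_eq_some_iff als (pyNormalize nm) i).mp hidx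
  subst hs
  have htakeR : (pre ++ pyNormalize nm :: suf).take R
      = pre ++ pyNormalize nm :: suf.take (R - i - 1) := by
    rw [List.take_append,
        List.take_of_length_le (by omega : pre.length ≤ R)]
    have h1 : R - pre.length = (R - i - 1) + 1 := by omega
    rw [h1, List.take_succ_cons]
  have htakei : (pre ++ pyNormalize nm :: suf).take i = pre := by
    rw [← hl, List.take_left]
  have hhead : aval (nm :: names) (pyNormalize nm :: suf.take (R - i - 1)) = some nm := by
    have hself : findName (nm :: names) (pyNormalize nm) = some nm := by
      simp [findName, List.find?]
    simp [aval, hself]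
  rw [htakeR, htakei, aval_append, aval_cons_notmem nm names pre hnot, hhead]

theorem interchange (als : List String) (names : List String) :
    ∀ (cur : Option (Int × String)),
    (names.foldl (gstep als) cur).map Prod.snd
      = (aval names (als.take (rankNat als cur))).or (cur.map Prod.snd) := by
  induction names with
  | nil => intro cur; simp [aval_nil_names]
  | cons nm rest ih =>
    intro cur
    simp only [List.foldl_cons]
    rw [ih]
    cases hidx : List.idxOf? (pyNormalize nm) als with
    | none =>
      have hidxI : PySem.List.index? als (pyNormalize nm) = none := by
        rw [PySem.List.index?_eq_idxOf?]; exact hidx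
      have hmem : pyNormalize nm ∉ als := (PySem.List.index?_eq_none_iff als _).mp hidxI
      have hmem' : pyNormalize nm ∉ als.take (rankNat als cur) :=
        fun hx => hmem (List.mem_of_mem_take hx)
      have hg : gstep als cur nm = cur := by simp only [gstep, hidx]
      rw [hg, aval_cons_notmem _ _ _ hmem']
    | some i =>
      have hidxI : PySem.List.index? als (pyNormalize nm) = some i := by
        rw [PySem.List.index?_eq_idxOf?]; exact hidx
      have hilen : i < als.length := index?_lt_length als _ i hidxI
      cases cur with
      | none =>
        have hg : gstep als none nm = some ((i : Int), nm) := by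
          simp only [gstep, hidx]
        rw [hg]
        have hR : rankNat als (none : Option (Int × String)) = als.length := rfl
        rw [hR, aval_take_hit nm rest als i als.length hidxI hilen]
        simp [rankNat]
      | some pr =>
        by_cases hlt : (i : Int) < pr.1
        · have hg : gstep als (some pr) nm = some ((i : Int), nm) := by
            simp only [gstep, hidx]
            simp [hlt]
          rw [hg]
          have hiR : i < rankNat als (some pr) := by
            simp only [rankNat]; exact Int.lt_toNat.mpr hlt
          rw [aval_take_hit nm rest als i _ hidxI hiR]
          simp [rankNat]
        · have hg : gstep als (some pr) nm = some pr := by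
            simp only [gstep, hidx]
            simp [hlt]
          rw [hg]
          have hri : rankNat als (some pr) ≤ i := by
            simp only [rankNat]; exact Int.toNat_le.mpr (le_of_not_gt hlt)
          have hmem' : pyNormalize nm ∉ als.take (rankNat als (some pr)) :=
            notmem_take_of_index? als _ i _ hidxI hri
          rw [aval_cons_notmem _ _ _ hmem']


-- folding insert over the constant table's fresh distinct keys = the list of pairs
theorem dict_vs_append (F : String × List String → Option String) :
    (CANONICAL_ALIASES.foldl (fun res ca => res.insert ca.1 (F ca)) PySem.Dict.empty).items
      = CANONICAL_ALIASES.map (fun ca => (ca.1, F ca)) := by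
  rw [PySem.Dict.items_foldl_insert_fresh CANONICAL_ALIASES (fun ca => ca.1) F PySem.Dict.empty
        (fun a _ => by simp) (by decide)]
  simp [PySem.Dict.empty]

-- per canonical: A's alias scan equals B's single-pass best entry for that canonical
theorem percanon (names : List String) (c : String) (als : List String)
    (hne : ∀ a ∈ als, pyNormalize a ≠ "")
    (hmap : als.map pyNormalize = als)
    (hC : ∀ k ∈ als, (IndexL.find? (fun p => p.1 == k)).map Prod.snd
            = (List.idxOf? k als).map (fun n => (c, (n : Int))))
    (hN : ∀ p ∈ IndexL, p.2.1 = c → p.1 ∈ als) :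
    (als.foldl (fun (st : Option String × Bool) al =>
        if st.2 then st
        else (findName names (pyNormalize al), pyTruthy (findName names (pyNormalize al))))
      (none, false)).1
      = ((names.foldl stepB PySem.Dict.empty).get? c).map Prod.snd := by
  rw [innerA names als hne, hmap, bestGet]
  have hge : (PySem.Dict.empty : PySem.Dict String (Int × String)).get? c = none := by simp
  rw [hge]
  have hfun : (fun (cur : Option (Int × String)) nm =>
      match buildIndexB.get? (pyNormalize nm) with
      | none => cur
      | some cr =>
        if cr.1 = c then
          match cur with
          | none => some (cr.2, nm)
          | some pr => if cr.2 < pr.1 then some (cr.2, nm) else cur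
        else cur) = gstep als := by
    funext cur nm
    rw [indexB_get?]
    cases hio : List.idxOf? (pyNormalize nm) als with
    | some i =>
      have hidxI : PySem.List.index? als (pyNormalize nm) = some i := by
        rw [PySem.List.index?_eq_idxOf?]; exact hio
      have hmem : pyNormalize nm ∈ als :=
        (PySem.List.index?_isSome_iff als _).mp (by rw [hidxI]; rfl)
      have hCk := hC _ hmem
      rw [hio] at hCk
      cases hf : IndexL.find? (fun p => p.1 == pyNormalize nm) with
      | none => rw [hf] at hCk; simp at hCk
      | some p =>
        rw [hf] at hCk
        simp only [Option.map_some] at hCk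
        have hp2 : p.2 = (c, (i : Int)) := by simpa using hCk
        simp only [Option.map_some, hp2, gstep, hio]
        simp
    | none =>
      have hidxI : PySem.List.index? als (pyNormalize nm) = none := by
        rw [PySem.List.index?_eq_idxOf?]; exact hio
      have hmem : pyNormalize nm ∉ als := (PySem.List.index?_eq_none_iff als _).mp hidxI
      cases hf : IndexL.find? (fun p => p.1 == pyNormalize nm) with
      | none => simp [gstep, hio]
      | some p =>
        have hp1 : p.1 = pyNormalize nm := by
          have := List.find?_some hf; simpa using this
        have hpmem := List.mem_of_find?_eq_some hf
        by_cases hc2 : p.2.1 = c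
        · exact absurd (hp1 ▸ hN p hpmem hc2) hmem
        · simp [gstep, hio, hc2]
  rw [hfun, interchange als names none]
  have : rankNat als (none : Option (Int × String)) = als.length := rfl
  rw [this, List.take_length]
  simp

-- ===== VERDICT (by name: the statement is the Claim_ definition above) =====
set_option maxRecDepth 100000 in
set_option maxHeartbeats 4000000 in
theorem resolve_segment_names_py_spec : Claim_equal_resolve_segment_names_py := by
  intro names _
  unfold Spec_resolve_segment_names_py
  simp only [resolve_segment_names_py, resolve_segment_names_py_alt, getNormalized]
  rw [dict_vs_append, dict_vs_append]
  apply List.map_congr_left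
  intro ca hca
  fin_cases hca <;>
    exact congrArg _ (percanon names _ _ (by decide) (by decide)
      (by rw [IndexL_lit]; decide) (by rw [IndexL_lit]; decide))
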